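-- pv_equiv track=rewrite | github.com/ydnyshhh/rlvr-gym | src/rlvr_gym/families/sokoban.py | _detect_deadlock
-- ===== SOURCE A (Python) =====
-- Coord = tuple[int, int]
--
-- def _freeze_axis_blocked(
--     box: Coord,
--     axis: str,
--     box_cells: set[Coord],
--     wall_cells: set[Coord],
--     goal_cells: set[Coord],
--     cache: dict[tuple[Coord, str], bool],
--     visiting: set[tuple[Coord, str]],
-- ) -> bool:
--     key = (box, axis)
--     if key in cache:
--         return cache[key]
--     if key in visiting:
--         return False
--     visiting.add(key)
--     if axis == "horizontal":
--         neighbors = [(box[0], box[1] - 1), (box[0], box[1] + 1)]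
--         other_axis = "vertical"
--     else:
--         neighbors = [(box[0] - 1, box[1]), (box[0] + 1, box[1])]
--         other_axis = "horizontal"
--
--     blocked_sides: list[bool] = []
--     for neighbor in neighbors:
--         if neighbor in wall_cells:
--             blocked_sides.append(True)
--         elif neighbor in box_cells and neighbor not in goal_cells:
--             blocked_sides.append(
--                 _freeze_axis_blocked(neighbor, other_axis, box_cells, wall_cells, goal_cells, cache, visiting)
--             )
--         else:
--             blocked_sides.append(False)
--     visiting.remove(key)
--     cache[key] = blocked_sides[0] and blocked_sides[1]
--     return cache[key]
--
-- def _freeze_deadlock_box(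
--     boxes: tuple[Coord, ...],
--     goals: tuple[Coord, ...],
--     walls: tuple[Coord, ...],
-- ) -> Coord | None:
--     box_cells = set(boxes)
--     goal_cells = set(goals)
--     wall_cells = set(walls)
--     cache: dict[tuple[Coord, str], bool] = {}
--     for box in boxes:
--         if box in goal_cells:
--             continue
--         horizontal_blocked = _freeze_axis_blocked(box, "horizontal", box_cells, wall_cells, goal_cells, cache, set())
--         vertical_blocked = _freeze_axis_blocked(box, "vertical", box_cells, wall_cells, goal_cells, cache, set())
--         if horizontal_blocked and vertical_blocked:
--             return box
--     return None
--
-- def _detect_deadlock(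
--     boxes: tuple[Coord, ...],
--     goals: tuple[Coord, ...],
--     taboo_cells: tuple[Coord, ...],
--     walls: tuple[Coord, ...],
-- ) -> str | None:
--     taboo = set(taboo_cells)
--     goal_cells = set(goals)
--     for box in boxes:
--         if box not in goal_cells and box in taboo:
--             return "static_dead_square"
--     frozen_box = _freeze_deadlock_box(boxes, goals, walls)
--     if frozen_box is not None:
--         return "freeze_deadlock"
--     return None
-- ===== SOURCE B (Python) =====
-- def _detect_deadlock(boxes, goals, taboo_cells, walls):
--     goal_cells = set(goals)
--     taboo = set(taboo_cells)
--     if any(box not in goal_cells and box in taboo for box in boxes):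
--         return "static_dead_square"
--     wall_cells = set(walls)
--     # Least-fixpoint freeze analysis: blocked[b] = (horizontally_blocked, vertically_blocked)
--     # for every non-goal box b, started all-False and recomputed in full rounds (Jacobi
--     # iteration) until stable; at most 2*len(blocked) entries can flip, so the round count
--     # is bounded.
--     blocked = {}
--     for b in boxes:
--         if b not in goal_cells:
--             blocked[b] = (False, False)
--     for _ in range(2 * len(blocked) + 1):
--         new = {}
--         for b in blocked:
--             h = all(
--                 n in wall_cells or blocked.get(n, (False, False))[1]
--                 for n in ((b[0], b[1] - 1), (b[0], b[1] + 1))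
--             )
--             v = all(
--                 n in wall_cells or blocked.get(n, (False, False))[0]
--                 for n in ((b[0] - 1, b[1]), (b[0] + 1, b[1]))
--             )
--             new[b] = (h, v)
--         if new == blocked:
--             break
--         blocked = new
--     for box in boxes:
--         if box not in goal_cells:
--             h, v = blocked[box]
--             if h and v:
--                 return "freeze_deadlock"
--     return None
-- ===== Notes on version B (the rewrite author's own statement) =====
-- stated objective: alternative
-- what changed: A detects frozen boxes by a mutually recursive DFS per (box, axis) with a shared memo cache and a visiting-set cycle cut; B instead computes the same blocked relation as an iterative least fixpoint: a dict mapping every non-goal box to an (h, v) blocked pair, started all-False and recomputed in full rounds until stable, then scanned in box order.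
import Mathlib
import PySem

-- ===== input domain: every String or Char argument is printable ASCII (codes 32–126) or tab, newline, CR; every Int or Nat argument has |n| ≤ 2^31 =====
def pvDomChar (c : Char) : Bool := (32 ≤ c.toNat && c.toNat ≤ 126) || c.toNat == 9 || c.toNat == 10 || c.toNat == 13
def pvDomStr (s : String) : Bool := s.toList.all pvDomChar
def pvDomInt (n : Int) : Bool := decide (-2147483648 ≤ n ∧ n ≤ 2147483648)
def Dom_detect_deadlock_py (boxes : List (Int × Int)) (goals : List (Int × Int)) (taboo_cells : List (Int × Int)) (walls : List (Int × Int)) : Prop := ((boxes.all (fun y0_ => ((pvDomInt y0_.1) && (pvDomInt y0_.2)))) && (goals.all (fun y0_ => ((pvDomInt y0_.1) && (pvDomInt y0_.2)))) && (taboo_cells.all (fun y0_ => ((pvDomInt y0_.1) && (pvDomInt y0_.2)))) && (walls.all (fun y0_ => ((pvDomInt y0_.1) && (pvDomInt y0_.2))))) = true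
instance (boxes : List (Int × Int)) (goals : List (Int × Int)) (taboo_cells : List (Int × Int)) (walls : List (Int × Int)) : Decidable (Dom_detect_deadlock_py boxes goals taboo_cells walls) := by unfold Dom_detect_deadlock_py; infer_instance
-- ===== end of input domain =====

-- B replaces A's recursive freeze search (memo cache + visiting-set cycle cut) by an
-- iterative least-fixpoint computation over all non-goal boxes; same return value, no
-- speed claim, return value only (A mutates nothing observable).

-- ===== PORT A =====
-- _freeze_axis_blocked: the recursion terminates because `visiting` strictly grows inside
-- the finite set of (non-goal box, axis) keys; `fuel` (any bound larger than that set, the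
-- callers pass 2*len(boxes)+1) only makes this total — the 0 branch is never reached.
-- `visiting` is restored by Python before returning, so it is passed down unchanged.
def pvA_fab (fuel : Nat) (box : Int × Int) (axis : String)
    (box_cells wall_cells goal_cells : PySem.Set (Int × Int))
    (cache : PySem.Dict ((Int × Int) × String) Bool)
    (visiting : PySem.Set ((Int × Int) × String)) :
    Bool × PySem.Dict ((Int × Int) × String) Bool :=
  match fuel with
  | 0 => (false, cache)
  | fuel + 1 =>
    match cache.get? (box, axis) with
    | some b => (b, cache)
    | none =>
      if PySem.Set.contains visiting (box, axis) then (false, cache)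
      else
        let visiting' := PySem.Set.add visiting (box, axis)
        let na := if axis == "horizontal"
          then ([(box.1, box.2 - 1), (box.1, box.2 + 1)], "vertical")
          else ([(box.1 - 1, box.2), (box.1 + 1, box.2)], "horizontal")
        let acc := na.1.foldl
          (fun (acc : List Bool × PySem.Dict ((Int × Int) × String) Bool) neighbor =>
            if PySem.Set.contains wall_cells neighbor then (acc.1 ++ [true], acc.2)
            else if PySem.Set.contains box_cells neighbor && !PySem.Set.contains goal_cells neighbor then
              let r := pvA_fab fuel neighbor na.2 box_cells wall_cells goal_cells acc.2 visiting'
              (acc.1 ++ [r.1], r.2)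
            else (acc.1 ++ [false], acc.2)) ([], cache)
        -- blocked_sides[0] and blocked_sides[1]: the list always has exactly two entries
        let r := (PySem.List.pyGet? acc.1 0).getD false && (PySem.List.pyGet? acc.1 1).getD false
        (r, acc.2.insert (box, axis) r)

def pvA_fdbLoop (fuel : Nat) (bs : List (Int × Int))
    (box_cells wall_cells goal_cells : PySem.Set (Int × Int))
    (cache : PySem.Dict ((Int × Int) × String) Bool) : Option (Int × Int) :=
  match bs with
  | [] => none
  | box :: rest =>
    if PySem.Set.contains goal_cells box then
      pvA_fdbLoop fuel rest box_cells wall_cells goal_cells cache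
    else
      let h := pvA_fab fuel box "horizontal" box_cells wall_cells goal_cells cache PySem.Set.empty
      let v := pvA_fab fuel box "vertical" box_cells wall_cells goal_cells h.2 PySem.Set.empty
      if h.1 && v.1 then some box
      else pvA_fdbLoop fuel rest box_cells wall_cells goal_cells v.2

def pvA_freeze_deadlock_box (boxes goals walls : List (Int × Int)) : Option (Int × Int) :=
  pvA_fdbLoop (2 * boxes.length + 1) boxes (PySem.Set.ofList boxes) (PySem.Set.ofList walls)
    (PySem.Set.ofList goals) PySem.Dict.empty

def pvA_staticLoop (bs : List (Int × Int)) (goal_cells taboo : PySem.Set (Int × Int)) : Bool :=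
  match bs with
  | [] => false
  | box :: rest =>
    if !PySem.Set.contains goal_cells box && PySem.Set.contains taboo box then true
    else pvA_staticLoop rest goal_cells taboo

def detect_deadlock_py (boxes : List (Int × Int)) (goals : List (Int × Int)) (taboo_cells : List (Int × Int)) (walls : List (Int × Int)) : Option String :=
  let taboo := PySem.Set.ofList taboo_cells
  let goal_cells := PySem.Set.ofList goals
  if pvA_staticLoop boxes goal_cells taboo then some "static_dead_square"
  else
    match pvA_freeze_deadlock_box boxes goals walls with
    | some _ => some "freeze_deadlock"
    | none => none

-- ===== PORT B =====
def pvB_eval (wall_cells : PySem.Set (Int × Int)) (blocked : PySem.Dict (Int × Int) (Bool × Bool))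
    (b : Int × Int) : Bool × Bool :=
  (([(b.1, b.2 - 1), (b.1, b.2 + 1)]).all
      (fun n => PySem.Set.contains wall_cells n || (blocked.getD n (false, false)).2),
   ([(b.1 - 1, b.2), (b.1 + 1, b.2)]).all
      (fun n => PySem.Set.contains wall_cells n || (blocked.getD n (false, false)).1))

-- one round: `new = {}; for b in blocked: new[b] = (h, v)`
def pvB_pass (wall_cells : PySem.Set (Int × Int)) (blocked : PySem.Dict (Int × Int) (Bool × Bool)) :
    PySem.Dict (Int × Int) (Bool × Bool) :=
  blocked.keys.foldl (fun new b => new.insert b (pvB_eval wall_cells blocked b)) PySem.Dict.empty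

-- the bounded rounds loop; `new == blocked` is exact as items-list equality here because
-- `new` lists the same keys in the same order as `blocked`
def pvB_loop (rounds : Nat) (wall_cells : PySem.Set (Int × Int))
    (blocked : PySem.Dict (Int × Int) (Bool × Bool)) : PySem.Dict (Int × Int) (Bool × Bool) :=
  match rounds with
  | 0 => blocked
  | k + 1 =>
    let new := pvB_pass wall_cells blocked
    if new = blocked then blocked else pvB_loop k wall_cells new

-- final scan; `blocked[box]` always hits (every non-goal box is a key), rendered with getD
def pvB_final (bs : List (Int × Int)) (goal_cells : PySem.Set (Int × Int))
    (blocked : PySem.Dict (Int × Int) (Bool × Bool)) : Bool :=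
  match bs with
  | [] => false
  | box :: rest =>
    if !PySem.Set.contains goal_cells box then
      let p := blocked.getD box (false, false)
      if p.1 && p.2 then true else pvB_final rest goal_cells blocked
    else pvB_final rest goal_cells blocked

def detect_deadlock_py_alt (boxes : List (Int × Int)) (goals : List (Int × Int)) (taboo_cells : List (Int × Int)) (walls : List (Int × Int)) : Option String :=
  let goal_cells := PySem.Set.ofList goals
  let taboo := PySem.Set.ofList taboo_cells
  if boxes.any (fun box => !PySem.Set.contains goal_cells box && PySem.Set.contains taboo box) then some "static_dead_square"
  else
    let wall_cells := PySem.Set.ofList walls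
    let init := boxes.foldl
      (fun d b => if !PySem.Set.contains goal_cells b then d.insert b (false, false) else d)
      PySem.Dict.empty
    let blocked := pvB_loop (2 * init.size + 1) wall_cells init
    if pvB_final boxes goal_cells blocked then some "freeze_deadlock" else none

-- ===== PRECONDITION & SPEC =====
def Spec_detect_deadlock_py (boxes : List (Int × Int)) (goals : List (Int × Int)) (taboo_cells : List (Int × Int)) (walls : List (Int × Int)) (out : Option String) : Prop := out = detect_deadlock_py_alt boxes goals taboo_cells walls
instance (boxes : List (Int × Int)) (goals : List (Int × Int)) (taboo_cells : List (Int × Int)) (walls : List (Int × Int)) (out : Option String) : Decidable (Spec_detect_deadlock_py boxes goals taboo_cells walls out) := by unfold Spec_detect_deadlock_py; infer_instance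

-- ===== CLAIM (what is proved, stated in full; the proofs are below) =====
def Claim_equal_detect_deadlock_py : Prop := ∀ (boxes : List (Int × Int)) (goals : List (Int × Int)) (taboo_cells : List (Int × Int)) (walls : List (Int × Int)), Dom_detect_deadlock_py boxes goals taboo_cells walls → Spec_detect_deadlock_py boxes goals taboo_cells walls (detect_deadlock_py boxes goals taboo_cells walls)

-- ===== LEMMAS AND PROOFS =====

def pvNbrs (c : Int × Int) (ax : Bool) : List (Int × Int) :=
  if ax then [(c.1, c.2 - 1), (c.1, c.2 + 1)] else [(c.1 - 1, c.2), (c.1 + 1, c.2)]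
def pvIter (boxes goals walls : List (Int × Int)) : Nat → (Int × Int) → Bool → Bool
  | 0, _, _ => false
  | n + 1, c, ax =>
    (pvNbrs c ax).all fun m =>
      decide (m ∈ walls) || (decide (m ∈ boxes) && !decide (m ∈ goals) && pvIter boxes goals walls n m (!ax))
def pvP (boxes goals walls : List (Int × Int)) (c : Int × Int) (ax : Bool) : Prop :=
  ∃ n, pvIter boxes goals walls n c ax = true
def pvCells (boxes goals : List (Int × Int)) : List (Int × Int) :=
  PySem.List.dedup (boxes.filter (fun c => !decide (c ∈ goals)))
lemma mem_pvCells {boxes goals : List (Int × Int)} {c : Int × Int} :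
    c ∈ pvCells boxes goals ↔ c ∈ boxes ∧ c ∉ goals := by
  simp [pvCells]

lemma pvIter_mono {boxes goals walls : List (Int × Int)} :
    ∀ {n : Nat} {c : Int × Int} {ax : Bool},
      pvIter boxes goals walls n c ax = true → pvIter boxes goals walls (n + 1) c ax = true := by
  intro n
  induction n with
  | zero => intro c ax h; simp [pvIter] at h
  | succ n ih =>
    intro c ax h
    simp only [pvIter, List.all_eq_true] at h ⊢
    intro m hm
    have := h m hm
    rcases Bool.or_eq_true_iff.mp this with hw | hb
    · exact Bool.or_eq_true_iff.mpr (Or.inl hw)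
    · refine Bool.or_eq_true_iff.mpr (Or.inr ?_)
      simp only [Bool.and_eq_true] at hb ⊢
      exact ⟨hb.1, ih hb.2⟩

lemma pvIter_le {boxes goals walls : List (Int × Int)} {n m : Nat} (h : n ≤ m)
    {c : Int × Int} {ax : Bool} (hc : pvIter boxes goals walls n c ax = true) :
    pvIter boxes goals walls m c ax = true := by
  induction m with
  | zero => have : n = 0 := by omega
            subst this; exact hc
  | succ m ih =>
    rcases Nat.lt_or_ge n (m + 1) with hlt | hge
    · exact pvIter_mono (ih (by omega))
    · have : n = m + 1 := by omega
      subst this; exact hc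

lemma pvP_unfold {boxes goals walls : List (Int × Int)} {c : Int × Int} {ax : Bool} :
    pvP boxes goals walls c ax ↔
      ∀ m ∈ pvNbrs c ax, m ∈ walls ∨ (m ∈ boxes ∧ m ∉ goals ∧ pvP boxes goals walls m (!ax)) := by
  constructor
  · rintro ⟨n, hn⟩ m hm
    cases n with
    | zero => simp [pvIter] at hn
    | succ n =>
      simp only [pvIter, List.all_eq_true] at hn
      have := hn m hm
      rcases Bool.or_eq_true_iff.mp this with hw | hb
      · exact Or.inl (by simpa using hw)
      · simp only [Bool.and_eq_true, decide_eq_true_eq, Bool.not_eq_eq_eq_not, Bool.not_true,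
          decide_eq_false_iff_not] at hb
        exact Or.inr ⟨hb.1.1, hb.1.2, ⟨n, hb.2⟩⟩
  · intro h
    have side : ∀ m, (m ∈ walls ∨ (m ∈ boxes ∧ m ∉ goals ∧ pvP boxes goals walls m (!ax))) →
        ∃ n, ∀ N, n ≤ N →
          (decide (m ∈ walls) || (decide (m ∈ boxes) && !decide (m ∈ goals) && pvIter boxes goals walls N m (!ax))) = true := by
      rintro m (hw | ⟨hb, hg, n, hn⟩)
      · exact ⟨0, fun N _ => by simp [hw]⟩
      · exact ⟨n, fun N hN => by simp [hb, hg, pvIter_le hN hn]⟩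
    cases ax with
    | true =>
      obtain ⟨n1, h1⟩ := side _ (h (c.1, c.2 - 1) (by simp [pvNbrs]))
      obtain ⟨n2, h2⟩ := side _ (h (c.1, c.2 + 1) (by simp [pvNbrs]))
      refine ⟨max n1 n2 + 1, ?_⟩
      have e1 := h1 _ (le_max_left n1 n2)
      have e2 := h2 _ (le_max_right n1 n2)
      simp only [pvIter, pvNbrs, List.all_eq_true]
      intro m hm
      simp at hm
      rcases hm with rfl | rfl
      · exact e1
      · exact e2
    | false =>
      obtain ⟨n1, h1⟩ := side _ (h (c.1 - 1, c.2) (by simp [pvNbrs]))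
      obtain ⟨n2, h2⟩ := side _ (h (c.1 + 1, c.2) (by simp [pvNbrs]))
      refine ⟨max n1 n2 + 1, ?_⟩
      have e1 := h1 _ (le_max_left n1 n2)
      have e2 := h2 _ (le_max_right n1 n2)
      simp only [pvIter, pvNbrs, List.all_eq_true]
      intro m hm
      simp at hm
      rcases hm with rfl | rfl
      · exact e1
      · exact e2

lemma pvIter_congr {boxes goals walls : List (Int × Int)} {n m : Nat}
    (h : ∀ b ∈ pvCells boxes goals, ∀ ax, pvIter boxes goals walls n b ax = pvIter boxes goals walls m b ax) :
    ∀ c ax, pvIter boxes goals walls (n + 1) c ax = pvIter boxes goals walls (m + 1) c ax := by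
  intro c ax
  simp only [pvIter]
  refine List.all_congr rfl ?_
  intro m
  by_cases hb : m ∈ boxes
  · by_cases hg : m ∈ goals
    · simp [hg]
    · have := h m (mem_pvCells.mpr ⟨hb, hg⟩) (!ax)
      simp [hb, hg, this]
  · simp [hb]

lemma nodup_pvCells (boxes goals : List (Int × Int)) : (pvCells boxes goals).Nodup := by
  simp [pvCells]

def pvStep (boxes goals walls : List (Int × Int)) : (Int × Int) × Bool → (Int × Int) × Bool → Prop :=
  fun k k' => k'.2 = !k.2 ∧ k'.1 ∈ pvNbrs k.1 k.2 ∧ k'.1 ∉ walls ∧ k'.1 ∈ boxes ∧ k'.1 ∉ goals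

lemma pvCycle_false {boxes goals walls : List (Int × Int)} :
    ∀ (n : Nat) (k : (Int × Int) × Bool), Relation.TransGen (pvStep boxes goals walls) k k →
      pvIter boxes goals walls n k.1 k.2 = false := by
  intro n
  induction n with
  | zero => intro k _; rfl
  | succ n ih =>
    intro k hk
    obtain ⟨k1, hstep, hrt⟩ := Relation.TransGen.head'_iff.mp hk
    have hk1 : Relation.TransGen (pvStep boxes goals walls) k1 k1 :=
      Relation.TransGen.tail' hrt hstep
    obtain ⟨hax, hmem, hw, hb, hg⟩ := hstep
    have hfalse : pvIter boxes goals walls n k1.1 k1.2 = false := ih k1 hk1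
    simp only [pvIter]
    apply List.all_eq_false.mpr
    refine ⟨k1.1, hmem, ?_⟩
    rw [hax] at hfalse
    simp [hw, hb, hg, hfalse]

lemma pvCycle_notP {boxes goals walls : List (Int × Int)} {k : (Int × Int) × Bool}
    (h : Relation.TransGen (pvStep boxes goals walls) k k) : ¬ pvP boxes goals walls k.1 k.2 := by
  rintro ⟨n, hn⟩; rw [pvCycle_false n k h] at hn; exact Bool.false_ne_true hn

def pvU (boxes goals : List (Int × Int)) : List ((Int × Int) × String) :=
  (pvCells boxes goals).flatMap (fun c => [(c, "horizontal"), (c, "vertical")])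

lemma mem_pvU {boxes goals : List (Int × Int)} {k : (Int × Int) × String} :
    k ∈ pvU boxes goals ↔ k.1 ∈ pvCells boxes goals ∧ (k.2 = "horizontal" ∨ k.2 = "vertical") := by
  cases k with
  | mk c s =>
    simp only [pvU, List.mem_flatMap, List.mem_cons, List.not_mem_nil, or_false, List.mem_singleton]
    constructor
    · rintro ⟨a, ha, (h | h)⟩ <;> (cases h; exact ⟨ha, by simp⟩)
    · rintro ⟨hc, (rfl | rfl)⟩
      · exact ⟨c, hc, Or.inl rfl⟩
      · exact ⟨c, hc, Or.inr rfl⟩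

lemma length_pvU (boxes goals : List (Int × Int)) :
    (pvU boxes goals).length = 2 * (pvCells boxes goals).length := by
  unfold pvU
  rw [List.length_flatMap]
  induction (pvCells boxes goals) with
  | nil => simp
  | cons c rest ih => simp; ring

def pvRestr (boxes goals walls : List (Int × Int)) (j : Nat) : PySem.Dict (Int × Int) (Bool × Bool) :=
  PySem.Dict.mk ((pvCells boxes goals).map
    (fun b => (b, (pvIter boxes goals walls j b true, pvIter boxes goals walls j b false))))

lemma getD_mk_map {ν : Type} (g : (Int × Int) → ν) (K : List (Int × Int)) (n : Int × Int) (d0 : ν) :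
    (PySem.Dict.mk (K.map (fun b => (b, g b)))).getD n d0 = if n ∈ K then g n else d0 := by
  induction K with
  | nil => rfl
  | cons k rest ih =>
    simp only [List.map_cons]
    rw [PySem.Dict.getD_eq_get?_getD, PySem.Dict.get?_mk_cons]
    by_cases hk : k = n
    · subst hk; simp
    · have : (k == n) = false := by simp [hk]
      rw [this]
      simp only [Bool.false_eq_true, if_false]
      rw [← PySem.Dict.getD_eq_get?_getD, ih]
      simp [List.mem_cons, Ne.symm hk]

lemma keys_pvRestr (boxes goals walls : List (Int × Int)) (j : Nat) :
    (pvRestr boxes goals walls j).keys = pvCells boxes goals := by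
  show List.map _ _ = _
  unfold pvRestr
  simp only [PySem.Dict.keys]
  rw [List.map_map]
  have : ∀ b ∈ pvCells boxes goals, (((fun x => x.1) ∘ fun b => (b, (pvIter boxes goals walls j b true, pvIter boxes goals walls j b false))) b) = id b := fun b _ => rfl
  rw [List.map_congr_left this, List.map_id]

lemma getD_pvRestr (boxes goals walls : List (Int × Int)) (j : Nat) (n : Int × Int) :
    (pvRestr boxes goals walls j).getD n (false, false) =
      if n ∈ pvCells boxes goals
      then (pvIter boxes goals walls j n true, pvIter boxes goals walls j n false)
      else (false, false) :=
  getD_mk_map _ _ _ _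

lemma pvPass_eq (boxes goals walls : List (Int × Int)) (j : Nat) :
    pvB_pass (PySem.Set.ofList walls) (pvRestr boxes goals walls j) = pvRestr boxes goals walls (j + 1) := by
  unfold pvB_pass
  rw [keys_pvRestr]
  apply PySem.Dict.ext
  rw [PySem.Dict.items_foldl_insert_fresh _ _ _ _ (by intro a _; simp [PySem.Dict.contains_empty]) (by simpa using nodup_pvCells boxes goals)]
  show PySem.Dict.empty.items ++ List.map (fun a => (a, pvB_eval (PySem.Set.ofList walls) (pvRestr boxes goals walls j) a)) (pvCells boxes goals) = (pvRestr boxes goals walls (j + 1)).items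
  rw [show (PySem.Dict.empty : PySem.Dict (Int × Int) (Bool × Bool)).items = [] from rfl, List.nil_append]
  show _ = List.map (fun b => (b, (pvIter boxes goals walls (j + 1) b true, pvIter boxes goals walls (j + 1) b false))) (pvCells boxes goals)
  apply List.map_congr_left
  intro b hb
  refine Prod.ext rfl (Prod.ext ?_ ?_)
  · simp only [pvB_eval, pvIter]
    apply List.all_congr (by simp [pvNbrs])
    intro m
    rw [getD_pvRestr]
    by_cases hw : m ∈ walls
    · simp [hw]
    · by_cases hm : m ∈ pvCells boxes goals
      · have := mem_pvCells.mp hm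
        simp [hw, hm, this.1, this.2]
      · have : ¬ (m ∈ boxes ∧ m ∉ goals) := fun hc => hm (mem_pvCells.mpr hc)
        by_cases hb2 : m ∈ boxes
        · have hg : m ∈ goals := by by_contra hg; exact this ⟨hb2, hg⟩
          simp [hw, hm, hb2, hg]
        · simp [hw, hm, hb2]
  · simp only [pvB_eval, pvIter]
    apply List.all_congr (by simp [pvNbrs])
    intro m
    rw [getD_pvRestr]
    by_cases hw : m ∈ walls
    · simp [hw]
    · by_cases hm : m ∈ pvCells boxes goals
      · have := mem_pvCells.mp hm
        simp [hw, hm, this.1, this.2]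
      · have : ¬ (m ∈ boxes ∧ m ∉ goals) := fun hc => hm (mem_pvCells.mpr hc)
        by_cases hb2 : m ∈ boxes
        · have hg : m ∈ goals := by by_contra hg; exact this ⟨hb2, hg⟩
          simp [hw, hm, hb2, hg]
        · simp [hw, hm, hb2]

lemma contains_mk_map {ν : Type} (g : (Int × Int) → ν) (K : List (Int × Int)) (n : Int × Int) :
    (PySem.Dict.mk (K.map (fun b => (b, g b)))).contains n = decide (n ∈ K) := by
  rw [PySem.Dict.contains_eq_decide_mem_keys]
  apply decide_eq_decide.mpr
  simp [PySem.Dict.keys, List.map_map, Function.comp]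

lemma pvInit_eq (boxes goals walls : List (Int × Int)) :
    (boxes.foldl
      (fun d b => if !PySem.Set.contains (PySem.Set.ofList goals) b then d.insert b (false, false) else d)
      PySem.Dict.empty) = pvRestr boxes goals walls 0 := by
  have main : ∀ l : List (Int × Int),
      (l.foldl
        (fun d b => if !PySem.Set.contains (PySem.Set.ofList goals) b then d.insert b (false, false) else d)
        PySem.Dict.empty) =
      PySem.Dict.mk ((PySem.List.dedup (l.filter (fun c => !decide (c ∈ goals)))).map
        (fun b => (b, ((false : Bool), (false : Bool))))) := by
    intro l
    induction l using List.reverseRecOn with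
    | nil => rfl
    | append_singleton l x ih =>
      rw [List.foldl_append, List.foldl_cons, List.foldl_nil, ih]
      by_cases hg : x ∈ goals
      · have : PySem.Set.contains (PySem.Set.ofList goals) x = true := by
          simp [hg]
        rw [this]
        simp only [Bool.not_true, Bool.false_eq_true, if_false]
        have : List.filter (fun c => !decide (c ∈ goals)) (l ++ [x]) =
            List.filter (fun c => !decide (c ∈ goals)) l := by
          rw [List.filter_append]; simp [hg]
        rw [this]
      · have hc : PySem.Set.contains (PySem.Set.ofList goals) x = false := by
          simp [hg]
        rw [hc]
        simp only [Bool.not_false, if_true]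
        have hf : List.filter (fun c => !decide (c ∈ goals)) (l ++ [x]) =
            List.filter (fun c => !decide (c ∈ goals)) l ++ [x] := by
          rw [List.filter_append]; simp [hg]
        rw [hf, PySem.List.dedup_eq_ofList, PySem.List.dedup_eq_ofList,
          PySem.Set.ofList_append_singleton, PySem.Set.add_eq_ite]
        by_cases hx : x ∈ PySem.Set.ofList (List.filter (fun c => !decide (c ∈ goals)) l)
        · rw [if_pos hx]
          apply PySem.Dict.ext
          rw [PySem.Dict.items_insert_of_contains]
          · show List.map _ _ = _
            rw [List.map_map]
            apply List.map_congr_left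
            intro b _
            simp only [Function.comp]
            by_cases hbx : b = x
            · subst hbx; simp
            · have : (b == x) = false := by simp [hbx]
              simp [this]
          · rw [contains_mk_map]
            simpa using hx
        · rw [if_neg hx]
          apply PySem.Dict.ext
          rw [PySem.Dict.items_insert_of_not_contains]
          · simp
          · rw [contains_mk_map]
            simpa using hx
  rw [main]
  rfl

def pvTC (boxes goals walls : List (Int × Int)) (j : Nat) : Nat :=
  ((pvCells boxes goals).map
    (fun b => (cond (pvIter boxes goals walls j b true) 1 0) + cond (pvIter boxes goals walls j b false) 1 0)).sum

lemma pvTC_le (boxes goals walls : List (Int × Int)) (j : Nat) :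
    pvTC boxes goals walls j ≤ 2 * (pvCells boxes goals).length := by
  unfold pvTC
  have h := List.sum_le_card_nsmul
    ((pvCells boxes goals).map
      (fun b => (cond (pvIter boxes goals walls j b true) 1 0) + cond (pvIter boxes goals walls j b false) 1 0)) 2
    (by
      intro x hx
      rcases List.mem_map.mp hx with ⟨b, _, rfl⟩
      cases pvIter boxes goals walls j b true <;> cases pvIter boxes goals walls j b false <;> simp)
  rw [List.length_map, smul_eq_mul] at h
  omega

lemma pvRestr_vals_eq {boxes goals walls : List (Int × Int)} {n m : Nat}
    (h : pvRestr boxes goals walls n = pvRestr boxes goals walls m) :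
    ∀ b ∈ pvCells boxes goals, ∀ ax, pvIter boxes goals walls n b ax = pvIter boxes goals walls m b ax := by
  intro b hb ax
  have := congrArg (fun d => PySem.Dict.getD d b ((false : Bool), (false : Bool))) h
  simp only [getD_pvRestr, hb, if_pos] at this
  cases ax
  · exact congrArg Prod.snd this
  · exact congrArg Prod.fst this

lemma pvTC_lt (boxes goals walls : List (Int × Int)) (j : Nat)
    (h : pvRestr boxes goals walls (j + 1) ≠ pvRestr boxes goals walls j) :
    pvTC boxes goals walls j < pvTC boxes goals walls (j + 1) := by
  have hex : ∃ b ∈ pvCells boxes goals,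
      (pvIter boxes goals walls j b true, pvIter boxes goals walls j b false) ≠
      (pvIter boxes goals walls (j + 1) b true, pvIter boxes goals walls (j + 1) b false) := by
    by_contra hall
    push_neg at hall
    apply h
    apply PySem.Dict.ext
    show List.map _ _ = List.map _ _
    apply List.map_congr_left
    intro b hb
    rw [Prod.ext_iff]
    exact ⟨rfl, (hall b hb).symm⟩
  obtain ⟨b0, hb0, hne⟩ := hex
  unfold pvTC
  apply List.sum_lt_sum
  · intro b _
    have h1 := @pvIter_mono boxes goals walls j b true
    have h2 := @pvIter_mono boxes goals walls j b false
    revert h1 h2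
    cases pvIter boxes goals walls j b true <;> cases pvIter boxes goals walls j b false <;>
      cases pvIter boxes goals walls (j + 1) b true <;> cases pvIter boxes goals walls (j + 1) b false <;>
      simp
  · refine ⟨b0, hb0, ?_⟩
    have h1 := @pvIter_mono boxes goals walls j b0 true
    have h2 := @pvIter_mono boxes goals walls j b0 false
    revert h1 h2 hne
    cases pvIter boxes goals walls j b0 true <;> cases pvIter boxes goals walls j b0 false <;>
      cases pvIter boxes goals walls (j + 1) b0 true <;> cases pvIter boxes goals walls (j + 1) b0 false <;>
      simp

lemma pvStable_ext (boxes goals walls : List (Int × Int)) (s : Nat)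
    (h : pvRestr boxes goals walls (s + 1) = pvRestr boxes goals walls s) :
    ∀ m, pvRestr boxes goals walls (s + m) = pvRestr boxes goals walls s := by
  intro m
  induction m with
  | zero => rfl
  | succ m ih =>
    have hvals := pvRestr_vals_eq ih
    have hstep := pvIter_congr hvals
    have : pvRestr boxes goals walls (s + m + 1) = pvRestr boxes goals walls (s + 1) := by
      apply PySem.Dict.ext
      show List.map _ _ = List.map _ _
      apply List.map_congr_left
      intro b _
      rw [Prod.ext_iff]
      exact ⟨rfl, Prod.ext_iff.mpr ⟨hstep b true, hstep b false⟩⟩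
    calc pvRestr boxes goals walls (s + (m + 1)) = pvRestr boxes goals walls (s + 1) := this
      _ = pvRestr boxes goals walls s := h

lemma pvB_loop_reaches (boxes goals walls : List (Int × Int)) :
    ∀ (k j : Nat), 2 * (pvCells boxes goals).length + 1 ≤ k + pvTC boxes goals walls j →
      ∃ s, j ≤ s ∧
        pvB_loop k (PySem.Set.ofList walls) (pvRestr boxes goals walls j) = pvRestr boxes goals walls s ∧
        pvRestr boxes goals walls (s + 1) = pvRestr boxes goals walls s := by
  intro k
  induction k with
  | zero =>
    intro j hj
    have := pvTC_le boxes goals walls j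
    omega
  | succ k ih =>
    intro j hj
    by_cases hc : pvB_pass (PySem.Set.ofList walls) (pvRestr boxes goals walls j) = pvRestr boxes goals walls j
    · refine ⟨j, le_refl j, ?_, ?_⟩
      · simp only [pvB_loop]
        rw [if_pos hc]
      · rw [← pvPass_eq]; exact hc
    · have hne : pvRestr boxes goals walls (j + 1) ≠ pvRestr boxes goals walls j := by
        rw [← pvPass_eq]; exact hc
      have hlt := pvTC_lt boxes goals walls j hne
      obtain ⟨s, hs1, hs2, hs3⟩ := ih (j + 1) (by omega)
      refine ⟨s, by omega, ?_, hs3⟩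
      simp only [pvB_loop]
      rw [if_neg hc, pvPass_eq]
      exact hs2

lemma pvStable_iff_P {boxes goals walls : List (Int × Int)} {s : Nat}
    (h : pvRestr boxes goals walls (s + 1) = pvRestr boxes goals walls s)
    {b : Int × Int} (hb : b ∈ pvCells boxes goals) {ax : Bool} :
    pvIter boxes goals walls s b ax = true ↔ pvP boxes goals walls b ax := by
  constructor
  · exact fun hh => ⟨s, hh⟩
  · rintro ⟨n, hn⟩
    rcases Nat.le_total n s with hle | hge
    · exact pvIter_le hle hn
    · obtain ⟨m, rfl⟩ := Nat.exists_eq_add_of_le hge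
      have := pvRestr_vals_eq (pvStable_ext boxes goals walls s h m) b hb ax
      rw [this] at hn
      exact hn

lemma pvB_final_iff {boxes goals walls : List (Int × Int)} {s : Nat}
    (hst : pvRestr boxes goals walls (s + 1) = pvRestr boxes goals walls s) :
    ∀ (bs : List (Int × Int)), bs ⊆ boxes →
      (pvB_final bs (PySem.Set.ofList goals) (pvRestr boxes goals walls s) = true ↔
        ∃ b ∈ bs, b ∉ goals ∧ pvP boxes goals walls b true ∧ pvP boxes goals walls b false) := by
  intro bs
  induction bs with
  | nil => simp [pvB_final]
  | cons b rest ih =>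
    intro hsub
    have hrest := ih (fun x hx => hsub (List.mem_cons_of_mem b hx))
    by_cases hg : b ∈ goals
    · have hcg : PySem.Set.contains (PySem.Set.ofList goals) b = true := by simp [hg]
      simp only [pvB_final, hcg, Bool.not_true, Bool.false_eq_true, if_false]
      rw [hrest]
      constructor
      · rintro ⟨x, hx, hprop⟩; exact ⟨x, List.mem_cons_of_mem b hx, hprop⟩
      · rintro ⟨x, hx, hprop⟩
        rcases List.mem_cons.mp hx with rfl | hx'
        · exact absurd hg hprop.1
        · exact ⟨x, hx', hprop⟩
    · have hcg : PySem.Set.contains (PySem.Set.ofList goals) b = false := by simp [hg]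
      have hbK : b ∈ pvCells boxes goals := mem_pvCells.mpr ⟨hsub List.mem_cons_self, hg⟩
      simp only [pvB_final, hcg, Bool.not_false, if_true]
      rw [getD_pvRestr, if_pos hbK]
      simp only []
      by_cases hcond : (pvIter boxes goals walls s b true && pvIter boxes goals walls s b false) = true
      · rw [if_pos hcond]
        rcases Bool.and_eq_true_iff.mp hcond with ⟨h1, h2⟩
        simp only [true_iff]
        exact ⟨b, List.mem_cons_self, hg,
          (pvStable_iff_P hst hbK).mp h1, (pvStable_iff_P hst hbK).mp h2⟩
      · rw [if_neg hcond, hrest]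
        constructor
        · rintro ⟨x, hx, hprop⟩; exact ⟨x, List.mem_cons_of_mem b hx, hprop⟩
        · rintro ⟨x, hx, hprop⟩
          rcases List.mem_cons.mp hx with rfl | hx'
          · exfalso
            apply hcond
            exact Bool.and_eq_true_iff.mpr
              ⟨(pvStable_iff_P hst hbK).mpr hprop.2.1, (pvStable_iff_P hst hbK).mpr hprop.2.2⟩
          · exact ⟨x, hx', hprop⟩

lemma pvB_freeze_iff (boxes goals walls : List (Int × Int)) :
    ((let goal_cells := PySem.Set.ofList goals
      let wall_cells := PySem.Set.ofList walls
      let init := boxes.foldl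
        (fun d b => if !PySem.Set.contains goal_cells b then d.insert b (false, false) else d)
        PySem.Dict.empty
      pvB_final boxes goal_cells (pvB_loop (2 * init.size + 1) wall_cells init)) = true ↔
      ∃ b ∈ boxes, b ∉ goals ∧ pvP boxes goals walls b true ∧ pvP boxes goals walls b false) := by
  simp only
  rw [pvInit_eq boxes goals walls]
  have hsize : (pvRestr boxes goals walls 0).size = (pvCells boxes goals).length := by
    simp [pvRestr, PySem.Dict.size]
  rw [hsize]
  obtain ⟨s, _, hloop, hstable⟩ :=
    pvB_loop_reaches boxes goals walls (2 * (pvCells boxes goals).length + 1) 0 (by omega)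
  rw [hloop]
  exact pvB_final_iff hstable boxes (fun x hx => hx)

def pvAx (s : String) : Bool := s == "horizontal"

def pvCacheOK (boxes goals walls : List (Int × Int))
    (cache : PySem.Dict ((Int × Int) × String) Bool) : Prop :=
  ∀ k b, cache.get? k = some b → (b = true ↔ pvP boxes goals walls k.1 (pvAx k.2))

lemma pvA_fab_main {boxes goals walls : List (Int × Int)} :
    ∀ (fuel : Nat) (box : Int × Int) (axis : String)
      (cache : PySem.Dict ((Int × Int) × String) Bool) (visiting : PySem.Set ((Int × Int) × String)),
      (axis = "horizontal" ∨ axis = "vertical") →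
      box ∈ boxes → box ∉ goals →
      pvCacheOK boxes goals walls cache →
      (∀ v ∈ visiting, Relation.TransGen (pvStep boxes goals walls) (v.1, pvAx v.2) (box, pvAx axis)) →
      visiting ⊆ pvU boxes goals → visiting.Nodup →
      (pvU boxes goals).length < fuel + visiting.length →
      pvCacheOK boxes goals walls
        (pvA_fab fuel box axis (PySem.Set.ofList boxes) (PySem.Set.ofList walls) (PySem.Set.ofList goals) cache visiting).2 ∧
      ((pvA_fab fuel box axis (PySem.Set.ofList boxes) (PySem.Set.ofList walls) (PySem.Set.ofList goals) cache visiting).1 = true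
        ↔ pvP boxes goals walls box (pvAx axis)) := by
  intro fuel
  induction fuel with
  | zero =>
    intro box axis cache visiting _ _ _ _ _ hsub hnd hfuel
    exact absurd ((hnd.subperm hsub).length_le) (by omega)
  | succ fuel ih =>
    intro box axis cache visiting haxis hbox hgoal hcache hvis hsub hnd hfuel
    rcases hget : cache.get? (box, axis) with _ | b
    · by_cases hv : PySem.Set.contains visiting (box, axis) = true
      · -- cycle cut: the key is on the current path, hence on a forced cycle
        have hcyc : Relation.TransGen (pvStep boxes goals walls) (box, pvAx axis) (box, pvAx axis) := by
          have := hvis (box, axis) (by simpa using hv)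
          exact this
        simp only [pvA_fab, hget, hv, if_true]
        exact ⟨hcache, iff_of_false (by simp) (pvCycle_notP hcyc)⟩
      · -- main body
        have hkeymem : (box, axis) ∈ pvU boxes goals :=
          mem_pvU.mpr ⟨mem_pvCells.mpr ⟨hbox, hgoal⟩, haxis⟩
        have hknotv : (box, axis) ∉ visiting := by
          intro hmem; exact hv (by simpa using hmem)
        have hvis' : PySem.Set.add visiting (box, axis) = visiting ++ [(box, axis)] :=
          PySem.Set.add_of_not_mem hknotv
        have hnd' : (visiting ++ [(box, axis)]).Nodup := by
          rw [List.nodup_append]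
          exact ⟨hnd, List.nodup_singleton _, by
            intro a ha b hb heq
            simp only [List.mem_singleton] at hb
            subst hb; rw [heq] at ha; exact hknotv ha⟩
        have hsub' : (visiting ++ [(box, axis)]) ⊆ pvU boxes goals := by
          intro a ha
          rcases List.mem_append.mp ha with h | h
          · exact hsub h
          · simp only [List.mem_singleton] at h; subst h; exact hkeymem
        -- generic side step
        have side : ∀ (n : Int × Int) (oax : String) (c : PySem.Dict ((Int × Int) × String) Bool),
            pvCacheOK boxes goals walls c →
            (oax = "horizontal" ∨ oax = "vertical") →
            pvAx oax = !pvAx axis →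
            n ∈ pvNbrs box (pvAx axis) →
            ((PySem.Set.contains (PySem.Set.ofList boxes) n && !PySem.Set.contains (PySem.Set.ofList goals) n) = true) →
            PySem.Set.contains (PySem.Set.ofList walls) n = false →
            pvCacheOK boxes goals walls
              (pvA_fab fuel n oax (PySem.Set.ofList boxes) (PySem.Set.ofList walls) (PySem.Set.ofList goals) c
                (PySem.Set.add visiting (box, axis))).2 ∧
            ((pvA_fab fuel n oax (PySem.Set.ofList boxes) (PySem.Set.ofList walls) (PySem.Set.ofList goals) c
                (PySem.Set.add visiting (box, axis))).1 = true ↔ pvP boxes goals walls n (pvAx oax)) := by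
          intro n oax c hc hoax hflip hmem hnb hnw
          have hnb' : n ∈ boxes ∧ n ∉ goals := by
            rcases Bool.and_eq_true_iff.mp hnb with ⟨h1, h2⟩
            constructor
            · simpa using h1
            · simpa using h2
          have hnw' : n ∉ walls := by simpa using hnw
          have hedge : pvStep boxes goals walls (box, pvAx axis) (n, pvAx oax) :=
            ⟨hflip, hmem, hnw', hnb'.1, hnb'.2⟩
          apply ih n oax c (PySem.Set.add visiting (box, axis)) hoax hnb'.1 hnb'.2 hc
          · intro v hvm
            rw [hvis'] at hvm
            rcases List.mem_append.mp hvm with h | h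
            · exact Relation.TransGen.tail (hvis v h) hedge
            · simp only [List.mem_singleton] at h; subst h
              exact Relation.TransGen.single hedge
          · rw [hvis']; exact hsub'
          · rw [hvis']; exact hnd'
          · rw [hvis', List.length_append, List.length_singleton]; omega
        rcases haxis with rfl | rfl
        · simp only [pvA_fab, hget, hv, Bool.false_eq_true, if_false,
            show (("horizontal" : String) == "horizontal") = true from by decide, if_true,
            List.foldl_cons, List.foldl_nil]
          have haxv : pvAx "horizontal" = true := by simp [pvAx]
          have hnbrs : pvNbrs box true = [(box.1, box.2 - 1), (box.1, box.2 + 1)] := rfl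
          have hg0 : ∀ (a b : Bool), (PySem.List.pyGet? [a, b] 0).getD false = a := by decide
          have hg1 : ∀ (a b : Bool), (PySem.List.pyGet? [a, b] 1).getD false = b := by decide
          have finish : ∀ (s1 s2 : Bool) (c' : PySem.Dict ((Int × Int) × String) Bool),
              pvCacheOK boxes goals walls c' →
              (s1 = true ↔ ((box.1, box.2 - 1) ∈ walls ∨ ((box.1, box.2 - 1) ∈ boxes ∧ (box.1, box.2 - 1) ∉ goals ∧ pvP boxes goals walls (box.1, box.2 - 1) (!true)))) →
              (s2 = true ↔ ((box.1, box.2 + 1) ∈ walls ∨ ((box.1, box.2 + 1) ∈ boxes ∧ (box.1, box.2 + 1) ∉ goals ∧ pvP boxes goals walls (box.1, box.2 + 1) (!true)))) →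
              pvCacheOK boxes goals walls
                (c'.insert (box, "horizontal") ((PySem.List.pyGet? [s1, s2] 0).getD false && (PySem.List.pyGet? [s1, s2] 1).getD false)) ∧
              (((PySem.List.pyGet? [s1, s2] 0).getD false && (PySem.List.pyGet? [s1, s2] 1).getD false) = true ↔
                pvP boxes goals walls box (pvAx "horizontal")) := by
            intro s1 s2 c' hc' hiff1 hiff2
            rw [hg0, hg1, haxv]
            have hPiff : pvP boxes goals walls box true ↔
                (((box.1, box.2 - 1) ∈ walls ∨ ((box.1, box.2 - 1) ∈ boxes ∧ (box.1, box.2 - 1) ∉ goals ∧ pvP boxes goals walls (box.1, box.2 - 1) (!true))) ∧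
                 ((box.1, box.2 + 1) ∈ walls ∨ ((box.1, box.2 + 1) ∈ boxes ∧ (box.1, box.2 + 1) ∉ goals ∧ pvP boxes goals walls (box.1, box.2 + 1) (!true)))) := by
              rw [pvP_unfold, hnbrs]
              constructor
              · intro h; exact ⟨h (box.1, box.2 - 1) (by simp), h (box.1, box.2 + 1) (by simp)⟩
              · rintro ⟨h1, h2⟩ m hm
                rcases (by simpa using hm : m = (box.1, box.2 - 1) ∨ m = (box.1, box.2 + 1)) with rfl | rfl
                · exact h1
                · exact h2
            have hmain : (s1 && s2) = true ↔ pvP boxes goals walls box true := by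
              rw [Bool.and_eq_true_iff, hPiff, hiff1, hiff2]
            refine ⟨?_, by rw [hmain]⟩
            intro k b hk
            by_cases hkk : k = (box, "horizontal")
            · subst hkk
              rw [PySem.Dict.get?_insert_self] at hk
              cases hk
              rw [haxv]
              exact hmain
            · rw [PySem.Dict.get?_insert_of_ne _ _ hkk] at hk
              exact hc' k b hk
          have hside1mem : (box.1, box.2 - 1) ∈ pvNbrs box (pvAx "horizontal") := by rw [haxv, hnbrs]; simp
          have hside2mem : (box.1, box.2 + 1) ∈ pvNbrs box (pvAx "horizontal") := by rw [haxv, hnbrs]; simp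
          have hoaxc : ("vertical" = "horizontal" ∨ ("vertical" : String) = "vertical") := by simp
          have hoaxflip : pvAx "vertical" = !pvAx "horizontal" := by simp [pvAx]
          have hnotside : ∀ (m : Int × Int),
              (PySem.Set.ofList walls).contains m = false →
              ((PySem.Set.ofList boxes).contains m && !(PySem.Set.ofList goals).contains m) = false →
              ((false : Bool) = true ↔ (m ∈ walls ∨ (m ∈ boxes ∧ m ∉ goals ∧ pvP boxes goals walls m (!true)))) := by
            intro m hmw hmb
            simp only [Bool.false_eq_true, false_iff]
            rintro (hh | ⟨hb, hg2, _⟩)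
            · have : (PySem.Set.ofList walls).contains m = true := by simpa using hh
              rw [hmw] at this; exact Bool.false_ne_true this
            · have : ((PySem.Set.ofList boxes).contains m && !(PySem.Set.ofList goals).contains m) = true := by
                simp [hb, hg2]
              rw [hmb] at this; exact Bool.false_ne_true this
          have hwallside : ∀ (m : Int × Int),
              (PySem.Set.ofList walls).contains m = true →
              ((true : Bool) = true ↔ (m ∈ walls ∨ (m ∈ boxes ∧ m ∉ goals ∧ pvP boxes goals walls m (!true)))) := by
            intro m hmw
            simp only [true_iff]
            exact Or.inl (by simpa using hmw)
          have hrecside : ∀ (m : Int × Int) (c : PySem.Dict ((Int × Int) × String) Bool),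
              pvCacheOK boxes goals walls c →
              m ∈ pvNbrs box (pvAx "horizontal") →
              ((PySem.Set.ofList boxes).contains m && !(PySem.Set.ofList goals).contains m) = true →
              (PySem.Set.ofList walls).contains m = false →
              pvCacheOK boxes goals walls
                (pvA_fab fuel m "vertical" (PySem.Set.ofList boxes) (PySem.Set.ofList walls) (PySem.Set.ofList goals) c
                  (visiting.add (box, "horizontal"))).2 ∧
              ((pvA_fab fuel m "vertical" (PySem.Set.ofList boxes) (PySem.Set.ofList walls) (PySem.Set.ofList goals) c
                  (visiting.add (box, "horizontal"))).1 = true ↔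
                (m ∈ walls ∨ (m ∈ boxes ∧ m ∉ goals ∧ pvP boxes goals walls m (!true)))) := by
            intro m c hc hmem hmb hmw
            obtain ⟨hrc, hriff⟩ := side m "vertical" c hc hoaxc hoaxflip (by rw [haxv] at hmem; exact hmem) hmb hmw
            refine ⟨hrc, ?_⟩
            rw [hriff, hoaxflip, haxv]
            rcases Bool.and_eq_true_iff.mp hmb with ⟨hx1, hx2⟩
            constructor
            · intro hp; exact Or.inr ⟨by simpa using hx1, by simpa using hx2, hp⟩
            · rintro (hh | ⟨_, _, hp⟩)
              · have : (PySem.Set.ofList walls).contains m = true := by simpa using hh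
                rw [hmw] at this; exact absurd this (by simp)
              · exact hp
          cases hw1 : (PySem.Set.ofList walls).contains (box.1, box.2 - 1) with
          | true =>
            rw [if_pos (show (true = true) from rfl)]
            cases hw2 : (PySem.Set.ofList walls).contains (box.1, box.2 + 1) with
            | true =>
              rw [if_pos (show (true = true) from rfl)]
              exact finish true true cache hcache (hwallside (box.1, box.2 - 1) hw1) (hwallside (box.1, box.2 + 1) hw2)
            | false =>
              rw [if_neg (show ¬(false = true) from by simp)]
              cases hb2 : ((PySem.Set.ofList boxes).contains (box.1, box.2 + 1) && !(PySem.Set.ofList goals).contains (box.1, box.2 + 1)) with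
              | true =>
                rw [if_pos (show (true = true) from rfl)]
                obtain ⟨hrc2, hriff2⟩ := hrecside (box.1, box.2 + 1) cache hcache hside2mem hb2 hw2
                exact finish true _ _ hrc2 (hwallside (box.1, box.2 - 1) hw1) hriff2
              | false =>
                rw [if_neg (show ¬(false = true) from by simp)]
                exact finish true false cache hcache (hwallside (box.1, box.2 - 1) hw1) (hnotside (box.1, box.2 + 1) hw2 hb2)
          | false =>
            rw [if_neg (show ¬(false = true) from by simp)]
            cases hb1 : ((PySem.Set.ofList boxes).contains (box.1, box.2 - 1) && !(PySem.Set.ofList goals).contains (box.1, box.2 - 1)) with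
            | true =>
              rw [if_pos (show (true = true) from rfl)]
              obtain ⟨hrc1, hriff1⟩ := hrecside (box.1, box.2 - 1) cache hcache hside1mem hb1 hw1
              cases hw2 : (PySem.Set.ofList walls).contains (box.1, box.2 + 1) with
              | true =>
                rw [if_pos (show (true = true) from rfl)]
                exact finish _ true _ hrc1 hriff1 (hwallside (box.1, box.2 + 1) hw2)
              | false =>
                rw [if_neg (show ¬(false = true) from by simp)]
                cases hb2 : ((PySem.Set.ofList boxes).contains (box.1, box.2 + 1) && !(PySem.Set.ofList goals).contains (box.1, box.2 + 1)) with
                | true =>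
                  rw [if_pos (show (true = true) from rfl)]
                  obtain ⟨hrc2, hriff2⟩ := hrecside (box.1, box.2 + 1) _ hrc1 hside2mem hb2 hw2
                  exact finish _ _ _ hrc2 hriff1 hriff2
                | false =>
                  rw [if_neg (show ¬(false = true) from by simp)]
                  exact finish _ false _ hrc1 hriff1 (hnotside (box.1, box.2 + 1) hw2 hb2)
            | false =>
              rw [if_neg (show ¬(false = true) from by simp)]
              cases hw2 : (PySem.Set.ofList walls).contains (box.1, box.2 + 1) with
              | true =>
                rw [if_pos (show (true = true) from rfl)]
                exact finish false true cache hcache (hnotside (box.1, box.2 - 1) hw1 hb1) (hwallside (box.1, box.2 + 1) hw2)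
              | false =>
                rw [if_neg (show ¬(false = true) from by simp)]
                cases hb2 : ((PySem.Set.ofList boxes).contains (box.1, box.2 + 1) && !(PySem.Set.ofList goals).contains (box.1, box.2 + 1)) with
                | true =>
                  rw [if_pos (show (true = true) from rfl)]
                  obtain ⟨hrc2, hriff2⟩ := hrecside (box.1, box.2 + 1) cache hcache hside2mem hb2 hw2
                  exact finish false _ _ hrc2 (hnotside (box.1, box.2 - 1) hw1 hb1) hriff2
                | false =>
                  rw [if_neg (show ¬(false = true) from by simp)]
                  exact finish false false cache hcache (hnotside (box.1, box.2 - 1) hw1 hb1) (hnotside (box.1, box.2 + 1) hw2 hb2)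
        · simp only [pvA_fab, hget, hv, Bool.false_eq_true, if_false,
            show (("vertical" : String) == "horizontal") = false from by decide, 
            List.foldl_cons, List.foldl_nil]
          have haxv : pvAx "vertical" = false := by simp [pvAx]
          have hnbrs : pvNbrs box false = [(box.1 - 1, box.2), (box.1 + 1, box.2)] := rfl
          have hg0 : ∀ (a b : Bool), (PySem.List.pyGet? [a, b] 0).getD false = a := by decide
          have hg1 : ∀ (a b : Bool), (PySem.List.pyGet? [a, b] 1).getD false = b := by decide
          have finish : ∀ (s1 s2 : Bool) (c' : PySem.Dict ((Int × Int) × String) Bool),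
              pvCacheOK boxes goals walls c' →
              (s1 = true ↔ ((box.1 - 1, box.2) ∈ walls ∨ ((box.1 - 1, box.2) ∈ boxes ∧ (box.1 - 1, box.2) ∉ goals ∧ pvP boxes goals walls (box.1 - 1, box.2) (!false)))) →
              (s2 = true ↔ ((box.1 + 1, box.2) ∈ walls ∨ ((box.1 + 1, box.2) ∈ boxes ∧ (box.1 + 1, box.2) ∉ goals ∧ pvP boxes goals walls (box.1 + 1, box.2) (!false)))) →
              pvCacheOK boxes goals walls
                (c'.insert (box, "vertical") ((PySem.List.pyGet? [s1, s2] 0).getD false && (PySem.List.pyGet? [s1, s2] 1).getD false)) ∧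
              (((PySem.List.pyGet? [s1, s2] 0).getD false && (PySem.List.pyGet? [s1, s2] 1).getD false) = true ↔
                pvP boxes goals walls box (pvAx "vertical")) := by
            intro s1 s2 c' hc' hiff1 hiff2
            rw [hg0, hg1, haxv]
            have hPiff : pvP boxes goals walls box false ↔
                (((box.1 - 1, box.2) ∈ walls ∨ ((box.1 - 1, box.2) ∈ boxes ∧ (box.1 - 1, box.2) ∉ goals ∧ pvP boxes goals walls (box.1 - 1, box.2) (!false))) ∧
                 ((box.1 + 1, box.2) ∈ walls ∨ ((box.1 + 1, box.2) ∈ boxes ∧ (box.1 + 1, box.2) ∉ goals ∧ pvP boxes goals walls (box.1 + 1, box.2) (!false)))) := by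
              rw [pvP_unfold, hnbrs]
              constructor
              · intro h; exact ⟨h (box.1 - 1, box.2) (by simp), h (box.1 + 1, box.2) (by simp)⟩
              · rintro ⟨h1, h2⟩ m hm
                rcases (by simpa using hm : m = (box.1 - 1, box.2) ∨ m = (box.1 + 1, box.2)) with rfl | rfl
                · exact h1
                · exact h2
            have hmain : (s1 && s2) = true ↔ pvP boxes goals walls box false := by
              rw [Bool.and_eq_true_iff, hPiff, hiff1, hiff2]
            refine ⟨?_, by rw [hmain]⟩
            intro k b hk
            by_cases hkk : k = (box, "vertical")
            · subst hkk
              rw [PySem.Dict.get?_insert_self] at hk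
              cases hk
              rw [haxv]
              exact hmain
            · rw [PySem.Dict.get?_insert_of_ne _ _ hkk] at hk
              exact hc' k b hk
          have hside1mem : (box.1 - 1, box.2) ∈ pvNbrs box (pvAx "vertical") := by rw [haxv, hnbrs]; simp
          have hside2mem : (box.1 + 1, box.2) ∈ pvNbrs box (pvAx "vertical") := by rw [haxv, hnbrs]; simp
          have hoaxc : ("horizontal" = "horizontal" ∨ ("horizontal" : String) = "vertical") := by simp
          have hoaxflip : pvAx "horizontal" = !pvAx "vertical" := by simp [pvAx]
          have hnotside : ∀ (m : Int × Int),
              (PySem.Set.ofList walls).contains m = false →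
              ((PySem.Set.ofList boxes).contains m && !(PySem.Set.ofList goals).contains m) = false →
              ((false : Bool) = true ↔ (m ∈ walls ∨ (m ∈ boxes ∧ m ∉ goals ∧ pvP boxes goals walls m (!false)))) := by
            intro m hmw hmb
            simp only [Bool.false_eq_true, false_iff]
            rintro (hh | ⟨hb, hg2, _⟩)
            · have : (PySem.Set.ofList walls).contains m = true := by simpa using hh
              rw [hmw] at this; exact Bool.false_ne_true this
            · have : ((PySem.Set.ofList boxes).contains m && !(PySem.Set.ofList goals).contains m) = true := by
                simp [hb, hg2]
              rw [hmb] at this; exact Bool.false_ne_true this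
          have hwallside : ∀ (m : Int × Int),
              (PySem.Set.ofList walls).contains m = true →
              ((true : Bool) = true ↔ (m ∈ walls ∨ (m ∈ boxes ∧ m ∉ goals ∧ pvP boxes goals walls m (!false)))) := by
            intro m hmw
            simp only [true_iff]
            exact Or.inl (by simpa using hmw)
          have hrecside : ∀ (m : Int × Int) (c : PySem.Dict ((Int × Int) × String) Bool),
              pvCacheOK boxes goals walls c →
              m ∈ pvNbrs box (pvAx "vertical") →
              ((PySem.Set.ofList boxes).contains m && !(PySem.Set.ofList goals).contains m) = true →
              (PySem.Set.ofList walls).contains m = false →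
              pvCacheOK boxes goals walls
                (pvA_fab fuel m "horizontal" (PySem.Set.ofList boxes) (PySem.Set.ofList walls) (PySem.Set.ofList goals) c
                  (visiting.add (box, "vertical"))).2 ∧
              ((pvA_fab fuel m "horizontal" (PySem.Set.ofList boxes) (PySem.Set.ofList walls) (PySem.Set.ofList goals) c
                  (visiting.add (box, "vertical"))).1 = true ↔
                (m ∈ walls ∨ (m ∈ boxes ∧ m ∉ goals ∧ pvP boxes goals walls m (!false)))) := by
            intro m c hc hmem hmb hmw
            obtain ⟨hrc, hriff⟩ := side m "horizontal" c hc hoaxc hoaxflip (by rw [haxv] at hmem; exact hmem) hmb hmw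
            refine ⟨hrc, ?_⟩
            rw [hriff, hoaxflip, haxv]
            rcases Bool.and_eq_true_iff.mp hmb with ⟨hx1, hx2⟩
            constructor
            · intro hp; exact Or.inr ⟨by simpa using hx1, by simpa using hx2, hp⟩
            · rintro (hh | ⟨_, _, hp⟩)
              · have : (PySem.Set.ofList walls).contains m = true := by simpa using hh
                rw [hmw] at this; exact absurd this (by simp)
              · exact hp
          cases hw1 : (PySem.Set.ofList walls).contains (box.1 - 1, box.2) with
          | true =>
            rw [if_pos (show (true = true) from rfl)]
            cases hw2 : (PySem.Set.ofList walls).contains (box.1 + 1, box.2) with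
            | true =>
              rw [if_pos (show (true = true) from rfl)]
              exact finish true true cache hcache (hwallside (box.1 - 1, box.2) hw1) (hwallside (box.1 + 1, box.2) hw2)
            | false =>
              rw [if_neg (show ¬(false = true) from by simp)]
              cases hb2 : ((PySem.Set.ofList boxes).contains (box.1 + 1, box.2) && !(PySem.Set.ofList goals).contains (box.1 + 1, box.2)) with
              | true =>
                rw [if_pos (show (true = true) from rfl)]
                obtain ⟨hrc2, hriff2⟩ := hrecside (box.1 + 1, box.2) cache hcache hside2mem hb2 hw2
                exact finish true _ _ hrc2 (hwallside (box.1 - 1, box.2) hw1) hriff2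
              | false =>
                rw [if_neg (show ¬(false = true) from by simp)]
                exact finish true false cache hcache (hwallside (box.1 - 1, box.2) hw1) (hnotside (box.1 + 1, box.2) hw2 hb2)
          | false =>
            rw [if_neg (show ¬(false = true) from by simp)]
            cases hb1 : ((PySem.Set.ofList boxes).contains (box.1 - 1, box.2) && !(PySem.Set.ofList goals).contains (box.1 - 1, box.2)) with
            | true =>
              rw [if_pos (show (true = true) from rfl)]
              obtain ⟨hrc1, hriff1⟩ := hrecside (box.1 - 1, box.2) cache hcache hside1mem hb1 hw1
              cases hw2 : (PySem.Set.ofList walls).contains (box.1 + 1, box.2) with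
              | true =>
                rw [if_pos (show (true = true) from rfl)]
                exact finish _ true _ hrc1 hriff1 (hwallside (box.1 + 1, box.2) hw2)
              | false =>
                rw [if_neg (show ¬(false = true) from by simp)]
                cases hb2 : ((PySem.Set.ofList boxes).contains (box.1 + 1, box.2) && !(PySem.Set.ofList goals).contains (box.1 + 1, box.2)) with
                | true =>
                  rw [if_pos (show (true = true) from rfl)]
                  obtain ⟨hrc2, hriff2⟩ := hrecside (box.1 + 1, box.2) _ hrc1 hside2mem hb2 hw2
                  exact finish _ _ _ hrc2 hriff1 hriff2
                | false =>
                  rw [if_neg (show ¬(false = true) from by simp)]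
                  exact finish _ false _ hrc1 hriff1 (hnotside (box.1 + 1, box.2) hw2 hb2)
            | false =>
              rw [if_neg (show ¬(false = true) from by simp)]
              cases hw2 : (PySem.Set.ofList walls).contains (box.1 + 1, box.2) with
              | true =>
                rw [if_pos (show (true = true) from rfl)]
                exact finish false true cache hcache (hnotside (box.1 - 1, box.2) hw1 hb1) (hwallside (box.1 + 1, box.2) hw2)
              | false =>
                rw [if_neg (show ¬(false = true) from by simp)]
                cases hb2 : ((PySem.Set.ofList boxes).contains (box.1 + 1, box.2) && !(PySem.Set.ofList goals).contains (box.1 + 1, box.2)) with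
                | true =>
                  rw [if_pos (show (true = true) from rfl)]
                  obtain ⟨hrc2, hriff2⟩ := hrecside (box.1 + 1, box.2) cache hcache hside2mem hb2 hw2
                  exact finish false _ _ hrc2 (hnotside (box.1 - 1, box.2) hw1 hb1) hriff2
                | false =>
                  rw [if_neg (show ¬(false = true) from by simp)]
                  exact finish false false cache hcache (hnotside (box.1 - 1, box.2) hw1 hb1) (hnotside (box.1 + 1, box.2) hw2 hb2)
    · simp only [pvA_fab, hget]
      exact ⟨hcache, hcache (box, axis) b hget⟩

lemma length_pvCells_le (boxes goals : List (Int × Int)) :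
    (pvCells boxes goals).length ≤ boxes.length := by
  simp only [pvCells, PySem.List.dedup_eq_ofList]
  exact le_trans (PySem.Set.length_ofList_le _) (List.length_filter_le _ _)

lemma pvFuel_ok (boxes goals : List (Int × Int)) :
    (pvU boxes goals).length < (2 * boxes.length + 1) + (PySem.Set.empty : PySem.Set ((Int × Int) × String)).length := by
  rw [length_pvU]
  have := length_pvCells_le boxes goals
  simp [PySem.Set.empty]
  omega

lemma pvA_fdbLoop_none {boxes goals walls : List (Int × Int)} :
    ∀ (bs : List (Int × Int)) (cache : PySem.Dict ((Int × Int) × String) Bool),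
      bs ⊆ boxes →
      pvCacheOK boxes goals walls cache →
      ((pvA_fdbLoop (2 * boxes.length + 1) bs (PySem.Set.ofList boxes) (PySem.Set.ofList walls)
          (PySem.Set.ofList goals) cache) = none ↔
        ¬ ∃ b ∈ bs, b ∉ goals ∧ pvP boxes goals walls b true ∧ pvP boxes goals walls b false) := by
  intro bs
  induction bs with
  | nil => intro cache _ _; simp [pvA_fdbLoop]
  | cons box rest ih =>
    intro cache hsub hcache
    have hsubr : rest ⊆ boxes := fun x hx => hsub (List.mem_cons_of_mem box hx)
    by_cases hg : box ∈ goals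
    · have hcg : PySem.Set.contains (PySem.Set.ofList goals) box = true := by simp [hg]
      simp only [pvA_fdbLoop, hcg, if_true]
      rw [ih cache hsubr hcache]
      constructor
      · intro hne ⟨x, hx, hprop⟩
        rcases List.mem_cons.mp hx with rfl | hx'
        · exact hprop.1 hg
        · exact hne ⟨x, hx', hprop⟩
      · intro hne ⟨x, hx, hprop⟩
        exact hne ⟨x, List.mem_cons_of_mem box hx, hprop⟩
    · have hcg : PySem.Set.contains (PySem.Set.ofList goals) box = false := by simp [hg]
      simp only [pvA_fdbLoop, hcg, Bool.false_eq_true, if_false]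
      have hbox : box ∈ boxes := hsub List.mem_cons_self
      obtain ⟨hc1, hiff1⟩ := pvA_fab_main (2 * boxes.length + 1) box "horizontal" cache PySem.Set.empty
        (Or.inl rfl) hbox hg hcache (by intro v hv; simp [PySem.Set.empty] at hv)
        (by intro v hv; simp [PySem.Set.empty] at hv)
        (by simp [PySem.Set.empty]) (pvFuel_ok boxes goals)
      obtain ⟨hc2, hiff2⟩ := pvA_fab_main (2 * boxes.length + 1) box "vertical" _ PySem.Set.empty
        (Or.inr rfl) hbox hg hc1 (by intro v hv; simp [PySem.Set.empty] at hv)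
        (by intro v hv; simp [PySem.Set.empty] at hv)
        (by simp [PySem.Set.empty]) (pvFuel_ok boxes goals)
      have haxh : pvAx "horizontal" = true := by simp [pvAx]
      have haxv : pvAx "vertical" = false := by simp [pvAx]
      rw [haxh] at hiff1
      rw [haxv] at hiff2
      by_cases hcond : ((pvA_fab (2 * boxes.length + 1) box "horizontal" (PySem.Set.ofList boxes) (PySem.Set.ofList walls) (PySem.Set.ofList goals) cache PySem.Set.empty).1 &&
          (pvA_fab (2 * boxes.length + 1) box "vertical" (PySem.Set.ofList boxes) (PySem.Set.ofList walls) (PySem.Set.ofList goals)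
            (pvA_fab (2 * boxes.length + 1) box "horizontal" (PySem.Set.ofList boxes) (PySem.Set.ofList walls) (PySem.Set.ofList goals) cache PySem.Set.empty).2
            PySem.Set.empty).1) = true
      · rw [if_pos hcond]
        rcases Bool.and_eq_true_iff.mp hcond with ⟨hh, hv2⟩
        simp only [reduceCtorEq, false_iff, not_not]
        exact ⟨box, List.mem_cons_self, hg, hiff1.mp hh, hiff2.mp hv2⟩
      · rw [if_neg hcond]
        rw [ih _ hsubr hc2]
        constructor
        · intro hne ⟨x, hx, hprop⟩
          rcases List.mem_cons.mp hx with rfl | hx'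
          · exact hcond (Bool.and_eq_true_iff.mpr ⟨hiff1.mpr hprop.2.1, hiff2.mpr hprop.2.2⟩)
          · exact hne ⟨x, hx', hprop⟩
        · intro hne ⟨x, hx, hprop⟩
          exact hne ⟨x, List.mem_cons_of_mem box hx, hprop⟩

lemma pvA_freeze_iff (boxes goals walls : List (Int × Int)) :
    (pvA_freeze_deadlock_box boxes goals walls = none ↔
      ¬ ∃ b ∈ boxes, b ∉ goals ∧ pvP boxes goals walls b true ∧ pvP boxes goals walls b false) := by
  unfold pvA_freeze_deadlock_box
  exact pvA_fdbLoop_none boxes PySem.Dict.empty (fun x hx => hx)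
    (by intro k b hk; rw [PySem.Dict.get?_empty] at hk; cases hk)

lemma static_eq (bs : List (Int × Int)) (g t : PySem.Set (Int × Int)) :
    pvA_staticLoop bs g t = bs.any (fun box => !PySem.Set.contains g box && PySem.Set.contains t box) := by
  induction bs with
  | nil => rfl
  | cons b rest ih =>
    simp only [pvA_staticLoop, List.any_cons, ← ih]
    by_cases hc : (!PySem.Set.contains g b && PySem.Set.contains t b) = true
    · rw [if_pos hc, hc]; rfl
    · rw [if_neg hc]
      have : (!PySem.Set.contains g b && PySem.Set.contains t b) = false := by
        revert hc; cases (!PySem.Set.contains g b && PySem.Set.contains t b) <;> simp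
      rw [this, Bool.false_or]

-- ===== VERDICT (by name: the statement is the Claim_ definition above) =====
theorem detect_deadlock_py_spec : Claim_equal_detect_deadlock_py := by
  intro boxes goals taboo_cells walls _
  unfold Spec_detect_deadlock_py
  have hA : detect_deadlock_py boxes goals taboo_cells walls =
      (if pvA_staticLoop boxes (PySem.Set.ofList goals) (PySem.Set.ofList taboo_cells) then some "static_dead_square"
       else match pvA_freeze_deadlock_box boxes goals walls with
         | some _ => some "freeze_deadlock"
         | none => none) := rfl
  have hB : detect_deadlock_py_alt boxes goals taboo_cells walls =
      (if boxes.any (fun box => !PySem.Set.contains (PySem.Set.ofList goals) box && PySem.Set.contains (PySem.Set.ofList taboo_cells) box) then some "static_dead_square"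
       else
         if pvB_final boxes (PySem.Set.ofList goals)
             (pvB_loop (2 * (boxes.foldl
                 (fun d b => if !PySem.Set.contains (PySem.Set.ofList goals) b then d.insert b (false, false) else d)
                 PySem.Dict.empty).size + 1)
               (PySem.Set.ofList walls)
               (boxes.foldl
                 (fun d b => if !PySem.Set.contains (PySem.Set.ofList goals) b then d.insert b (false, false) else d)
                 PySem.Dict.empty))
         then some "freeze_deadlock" else none) := rfl
  have hBiff : (pvB_final boxes (PySem.Set.ofList goals)
      (pvB_loop (2 * (boxes.foldl
          (fun d b => if !PySem.Set.contains (PySem.Set.ofList goals) b then d.insert b (false, false) else d)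
          PySem.Dict.empty).size + 1)
        (PySem.Set.ofList walls)
        (boxes.foldl
          (fun d b => if !PySem.Set.contains (PySem.Set.ofList goals) b then d.insert b (false, false) else d)
          PySem.Dict.empty)) = true) ↔
      ∃ b ∈ boxes, b ∉ goals ∧ pvP boxes goals walls b true ∧ pvP boxes goals walls b false :=
    pvB_freeze_iff boxes goals walls
  rw [hA, hB, static_eq]
  by_cases hs : boxes.any (fun box => !PySem.Set.contains (PySem.Set.ofList goals) box && PySem.Set.contains (PySem.Set.ofList taboo_cells) box) = true
  · rw [if_pos hs, if_pos hs]
  · rw [if_neg hs, if_neg hs]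
    by_cases hex : ∃ b ∈ boxes, b ∉ goals ∧ pvP boxes goals walls b true ∧ pvP boxes goals walls b false
    · rcases ho : pvA_freeze_deadlock_box boxes goals walls with _ | fb
      · exact absurd hex ((pvA_freeze_iff boxes goals walls).mp ho)
      · rw [if_pos (hBiff.mpr hex)]
    · have hnone : pvA_freeze_deadlock_box boxes goals walls = none :=
        (pvA_freeze_iff boxes goals walls).mpr hex
      rw [hnone, if_neg (fun hc => hex (hBiff.mp hc))]
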